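-- pv_equiv track=rewrite | github.com/eselyavka/python | practice/leetcode/solutions_01500/solution_01536.py | minSwaps
-- ===== SOURCE A (Python) =====
-- def minSwaps(grid):
--     """
--     :type grid: List[List[int]]
--     :rtype: int
--     """
--     n = len(grid)
--     trailing_zeros = [0] * n
--
--     for i in range(n):
--         tail_zeros = 0
--         for j in range(n - 1, -1, -1):
--             if grid[i][j]:
--                 break
--             tail_zeros += 1
--
--         trailing_zeros[i] = tail_zeros
--
--     answer = 0
--     for i in range(n - 1):
--         required = n - i - 1
--
--         index = -1
--         for j in range(i, n):
--             if trailing_zeros[j] >= required: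
--                 index = j
--                 break
--
--         if index == -1:
--             return -1
--
--         while index > i:
--             answer += 1
--             trailing_zeros[index - 1], trailing_zeros[index] = (
--                 trailing_zeros[index],
--                 trailing_zeros[index - 1],
--             )
--             index -= 1
--
--     return answer
-- ===== SOURCE B (Python) =====
-- def minSwaps(grid):
--     n = len(grid)
--     tz = []
--     for row in grid:
--         c = 0
--         for j in range(n - 1, -1, -1):
--             if row[j]:
--                 break
--             c += 1
--         tz.append(c)
--     ans = 0
--     need = n - 1
--     while need > 0:
--         k = -1
--         for idx, v in enumerate(tz):
--             if v >= need:
--                 k = idx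
--                 break
--         if k == -1:
--             return -1
--         ans += k
--         del tz[k]
--         need -= 1
--     return ans
-- ===== Notes on version B (the rewrite author's own statement) =====
-- stated objective: alternative
-- what changed: Phase 1 (trailing zeros per row) is kept; phase 2 no longer bubbles the chosen row upward with an inner while-loop of adjacent swaps on a fixed-size array - B keeps a shrinking list of counts, adds the found position directly to the answer and deletes that element, so the inner swap loop disappears.
import Mathlib
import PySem

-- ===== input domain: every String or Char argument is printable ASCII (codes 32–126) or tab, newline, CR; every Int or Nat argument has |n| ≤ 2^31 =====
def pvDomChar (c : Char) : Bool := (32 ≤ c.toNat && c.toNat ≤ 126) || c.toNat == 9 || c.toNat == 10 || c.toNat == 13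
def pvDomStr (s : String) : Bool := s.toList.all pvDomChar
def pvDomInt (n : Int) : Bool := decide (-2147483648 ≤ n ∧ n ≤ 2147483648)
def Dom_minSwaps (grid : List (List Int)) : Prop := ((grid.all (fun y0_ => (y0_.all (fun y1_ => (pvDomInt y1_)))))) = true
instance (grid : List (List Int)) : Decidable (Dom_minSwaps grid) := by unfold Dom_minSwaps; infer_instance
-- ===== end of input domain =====

-- B replaces A's inner while-loop of adjacent swaps by distance arithmetic plus one deletion
-- from a shrinking list (objective: alternative decomposition, same asymptotic cost).

-- ===== PORT A =====
-- inner loop `for j in range(n-1, -1, -1): if grid[i][j]: break; tail_zeros += 1`,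
-- hand-ported as a countdown recursion on the exclusive upper index; under Pre_ every
-- index j is in range (0 ≤ j < row.length), so `row.getD j 0` is exactly Python's row[j].
def tailCountA (row : List Int) : Nat → Int
  | 0 => 0
  | k + 1 => if row.getD k 0 ≠ 0 then 0 else 1 + tailCountA row k

-- `for j in range(i, n): if trailing_zeros[j] >= required: index = j; break` (else index = -1)
def searchA (tz : List Int) (req : Int) (j n : Nat) : Int :=
  if j < n then
    if tz.getD j 0 ≥ req then (j : Int) else searchA tz req (j + 1) n
  else -1
termination_by n - j

-- one simultaneous assignment tz[k-1], tz[k] = tz[k], tz[k-1]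
def swapAdjA (tz : List Int) (k : Nat) : List Int :=
  (tz.set (k - 1) (tz.getD k 0)).set k (tz.getD (k - 1) 0)

-- `while index > i: answer += 1; swap; index -= 1`
def whileA (tz : List Int) (idx i : Nat) (ans : Int) : List Int × Int :=
  if idx > i then whileA (swapAdjA tz idx) (idx - 1) i (ans + 1) else (tz, ans)
termination_by idx

-- `for i in range(n - 1): …` of A, as recursion on i with the early return -1
def loop2A (tz : List Int) (n i : Nat) (ans : Int) : Int :=
  if i < n - 1 then
    let req : Int := (n : Int) - (i : Int) - 1
    let idx := searchA tz req i n
    if idx = -1 then -1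
    else
      let p := whileA tz idx.toNat i ans
      loop2A p.1 n (i + 1) p.2
  else ans
termination_by n - 1 - i
decreasing_by omega

def minSwaps (grid : List (List Int)) : Int :=
  loop2A (grid.map (fun row => tailCountA row grid.length)) grid.length 0 0

-- ===== PORT B =====
-- B keeps A's phase 1: `for j in range(n-1, -1, -1): if row[j]: break; c += 1`,
-- the same countdown hand-port; row.getD j 0 is exactly row[j] under Pre_.
def tailCountB (row : List Int) : Nat → Int
  | 0 => 0
  | k + 1 => if row.getD k 0 ≠ 0 then 0 else 1 + tailCountB row k

-- `for idx, v in enumerate(tz): if v >= need: k = idx; break` (k = -1 rendered as none)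
def findB (tz : List Int) (need : Int) (idx : Nat) : Option Nat :=
  match tz with
  | [] => none
  | v :: r => if v ≥ need then some idx else findB r need (idx + 1)

-- `while need > 0: … ans += k; del tz[k]; need -= 1`
def loop2B (tz : List Int) (ans : Int) : Nat → Int
  | 0 => ans
  | m + 1 =>
    match findB tz ((m : Int) + 1) 0 with
    | none => -1
    | some k => loop2B (tz.eraseIdx k) (ans + (k : Int)) m

def minSwaps_alt (grid : List (List Int)) : Int :=
  loop2B (grid.map (fun row => tailCountB row grid.length)) 0 (grid.length - 1)

-- ===== PRECONDITION & SPEC =====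
-- Pre_ excludes exactly the grids with a row shorter than the grid, on which A's
-- grid[i][n-1] raises IndexError.
def Pre_minSwaps (grid : List (List Int)) : Prop :=
  ∀ row ∈ grid, grid.length ≤ row.length
instance (grid : List (List Int)) : Decidable (Pre_minSwaps grid) := by
  unfold Pre_minSwaps; infer_instance

def pvWitness_minSwaps : List (List Int) := [[0, 0], [1, 0]]

def Spec_minSwaps (grid : List (List Int)) (out : Int) : Prop := out = minSwaps_alt grid
instance (grid : List (List Int)) (out : Int) : Decidable (Spec_minSwaps grid out) := by unfold Spec_minSwaps; infer_instance

-- ===== CLAIM (what is proved, stated in full; the proofs are below) =====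
def Claim_equal_minSwaps : Prop := ∀ (grid : List (List Int)), Dom_minSwaps grid → Pre_minSwaps grid → Spec_minSwaps grid (minSwaps grid)


-- ===== LEMMAS AND PROOFS =====

-- Phase 1 is shared verbatim: the two countdown recursions coincide.
theorem tailCountB_eq (row : List Int) (n : Nat) : tailCountB row n = tailCountA row n := by
  induction n with
  | zero => rfl
  | succ m ih => rw [tailCountA, tailCountB, ih]

-- shift lemma for B's enumerate counter
theorem findB_shift (tz : List Int) (need : Int) (j : Nat) :
    findB tz need (j + 1) = Option.map (· + 1) (findB tz need j) := by
  induction tz generalizing j with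
  | nil => simp [findB]
  | cons v r ih =>
    by_cases h : v ≥ need
    · simp [findB, h]
    · simp [findB, h, ih]

-- A's search over pre ++ rem from index |pre| is B's search over rem, shifted.
theorem searchA_eq (rem : List Int) : ∀ (pre : List Int) (req : Int),
    searchA (pre ++ rem) req pre.length (pre.length + rem.length) =
      (match findB rem req 0 with
       | none => (-1 : Int)
       | some k => ((pre.length + k : Nat) : Int)) := by
  induction rem with
  | nil =>
    intro pre req
    rw [searchA]
    simp [findB]
  | cons v r ih =>
    intro pre req
    rw [searchA]
    have hlt : pre.length < pre.length + (v :: r).length := by simp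
    have hget : (pre ++ v :: r).getD pre.length 0 = v := by
      simp [List.getD]
    rw [if_pos hlt, hget]
    by_cases h : v ≥ req
    · simp [findB, h]
    · have h2 : pre.length + 1 = (pre ++ [v]).length := by simp
      have h3 : pre ++ v :: r = (pre ++ [v]) ++ r := by simp
      have h4 : pre.length + (v :: r).length = (pre ++ [v]).length + r.length := by
        simp; omega
      rw [if_neg h, h3, h2, h4, ih (pre ++ [v]) req]
      rw [show findB (v :: r) req 0 = Option.map (· + 1) (findB r req 0) by
        simp [findB, h, findB_shift]]
      cases hfr : findB r req 0 with
      | none => simp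
      | some k => simp; ring

theorem findB_decomp (tz : List Int) (need : Int) (k : Nat)
    (h : findB tz need 0 = some k) :
    ∃ mid x rest, tz = mid ++ x :: rest ∧ mid.length = k := by
  induction tz generalizing k with
  | nil => simp [findB] at h
  | cons v r ih =>
    by_cases hv : v ≥ need
    · simp [findB, hv] at h
      exact ⟨[], v, r, by simp, by simp [← h]⟩
    · simp [findB, hv, findB_shift] at h
      obtain ⟨k', hk', rfl⟩ := h
      obtain ⟨mid, x, rest, rfl, hlen⟩ := ih k' hk'
      exact ⟨v :: mid, x, rest, by simp, by simp [hlen]⟩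

theorem swapAdjA_mid (pre : List Int) (y x : Int) (rest : List Int) :
    swapAdjA (pre ++ y :: x :: rest) (pre.length + 1) = pre ++ x :: y :: rest := by
  unfold swapAdjA
  have h1 : (pre ++ y :: x :: rest).getD (pre.length + 1) 0 = x := by
    have : pre.length ≤ pre.length + 1 := by omega
    simp [List.getD]
  have h2 : (pre ++ y :: x :: rest).getD (pre.length + 1 - 1) 0 = y := by
    simp [List.getD]
  rw [h1, h2]
  have hs1 : (pre ++ y :: x :: rest).set (pre.length + 1 - 1) x = pre ++ x :: x :: rest := by
    rw [List.set_append]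
    simp
  rw [hs1, List.set_append]
  simp

-- bubbling the element x at position |pre| + |mid| down to position |pre|
theorem whileA_eq (mid : List Int) : ∀ (pre : List Int) (x : Int) (rest : List Int) (ans : Int),
    whileA (pre ++ mid ++ x :: rest) (pre.length + mid.length) pre.length ans =
      (pre ++ x :: (mid ++ rest), ans + mid.length) := by
  induction mid using List.reverseRecOn with
  | nil =>
    intro pre x rest ans
    rw [whileA]
    simp
  | append_singleton mid' y ih =>
    intro pre x rest ans
    rw [whileA]
    have hgt : pre.length + (mid' ++ [y]).length > pre.length := by simp
    rw [if_pos hgt]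
    have harr : pre ++ (mid' ++ [y]) ++ x :: rest = (pre ++ mid') ++ y :: x :: rest := by simp
    have hidx : pre.length + (mid' ++ [y]).length = (pre ++ mid').length + 1 := by
      simp; omega
    rw [harr, hidx, swapAdjA_mid (pre ++ mid') y x rest]
    have harr2 : (pre ++ mid') ++ x :: y :: rest = pre ++ mid' ++ x :: (y :: rest) := by simp
    have hidx2 : (pre ++ mid').length + 1 - 1 = pre.length + mid'.length := by simp
    rw [harr2, hidx2, ih pre x (y :: rest) (ans + 1)]
    simp
    ring

theorem eraseIdx_append_cons (mid : List Int) (x : Int) (rest : List Int) :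
    (mid ++ x :: rest).eraseIdx mid.length = mid ++ rest := by
  induction mid with
  | nil => rfl
  | cons a m ih => simp [ih]

-- unfolding equation for loop2A (zeta-reduced form of its body)
theorem loop2A_eq (tz : List Int) (n i : Nat) (ans : Int) :
    loop2A tz n i ans =
      if i < n - 1 then
        if searchA tz ((n : Int) - (i : Int) - 1) i n = -1 then -1
        else
          loop2A (whileA tz (searchA tz ((n : Int) - (i : Int) - 1) i n).toNat i ans).1
            n (i + 1) (whileA tz ((searchA tz ((n : Int) - (i : Int) - 1) i n)).toNat i ans).2
      else ans := by
  rw [loop2A]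

-- Phase 2: A's loop over the full array with a fixed prefix equals B's loop over the
-- shrinking remainder.
theorem loop2_eq (m : Nat) : ∀ (rem pre : List Int) (ans : Int), rem.length = m →
    loop2A (pre ++ rem) (pre.length + rem.length) pre.length ans =
      loop2B rem ans (rem.length - 1) := by
  induction m with
  | zero =>
    intro rem pre ans h
    have : rem = [] := List.length_eq_zero_iff.mp h
    subst this
    rw [loop2A_eq]
    simp [loop2B]
  | succ m ih =>
    intro rem pre ans h
    rw [loop2A_eq]
    by_cases hlt : pre.length < pre.length + rem.length - 1
    · obtain ⟨m', rfl⟩ : ∃ m', m = m' + 1 := ⟨m - 1, by omega⟩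
      rw [if_pos hlt]
      have hneed : ((pre.length + rem.length : Nat) : Int) - (pre.length : Int) - 1
          = (m' : Int) + 1 := by push_cast; omega
      rw [hneed, searchA_eq rem pre _]
      have hm1 : rem.length - 1 = m' + 1 := by omega
      rw [hm1]
      cases hf : findB rem ((m' : Int) + 1) 0 with
      | none => simp [loop2B, hf]
      | some k =>
        obtain ⟨mid, x, rest, hrem, hmid⟩ := findB_decomp _ _ _ hf
        subst hrem
        simp only [hf, loop2B]
        have hne : ((pre.length + k : Nat) : Int) ≠ -1 := by omega
        rw [if_neg hne]
        subst hmid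
        have htn : ((pre.length + mid.length : Nat) : Int).toNat
            = pre.length + mid.length := by omega
        have harr : pre ++ (mid ++ x :: rest) = pre ++ mid ++ x :: rest := by simp
        rw [htn, harr, whileA_eq mid pre x rest ans, eraseIdx_append_cons]
        have harr3 : pre ++ x :: (mid ++ rest) = (pre ++ [x]) ++ (mid ++ rest) := by simp
        have hlen1 : pre.length + 1 = (pre ++ [x]).length := by simp
        have hlen2 : pre.length + (mid ++ x :: rest).length
            = (pre ++ [x]).length + (mid ++ rest).length := by simp; omega
        simp only
        rw [harr3, hlen1, hlen2,
          ih (mid ++ rest) (pre ++ [x]) (ans + mid.length) (by simp at h ⊢; omega)]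
        have hm2 : (mid ++ rest).length - 1 = m' := by simp at h ⊢; omega
        rw [hm2]
    · rw [if_neg hlt]
      have hrem1 : rem.length = 1 := by omega
      rw [hrem1]
      simp [loop2B]

-- ===== VERDICT (by name: the statement is the Claim_ definition above) =====
theorem minSwaps_spec : Claim_equal_minSwaps := by
  intro grid _ _
  unfold Spec_minSwaps minSwaps minSwaps_alt
  have hmap : grid.map (fun row => tailCountB row grid.length)
      = grid.map (fun row => tailCountA row grid.length) := by
    apply List.map_congr_left
    intro row _
    exact tailCountB_eq row grid.length
  rw [hmap]
  have hL : (grid.map (fun row => tailCountA row grid.length)).length = grid.length := by simp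
  have h2 := loop2_eq (grid.map (fun row => tailCountA row grid.length)).length
    (grid.map (fun row => tailCountA row grid.length)) [] 0 rfl
  simp only [List.nil_append, List.length_nil, Nat.zero_add, hL] at h2
  exact h2
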